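-- pv_equiv track=rewrite | github.com/AndreiToroplean/loopover | loopover.py | _modular_median
-- ===== SOURCE A (Python) =====
-- def _modular_median(values, mod):
--     """Return the modular median. """
--     if len(values) == 0:
--         raise ValueError
--
--     pot_medians_shifts = []
--     for pot_median in values:
--         tot_shift = 0
--         for value in values:
--             tot_shift += abs(_smallest_shift(value - pot_median, mod))
--
--         pot_medians_shifts.append((pot_median, tot_shift))
--
--     return min(pot_medians_shifts, key=lambda x: x[1])[0]
--
-- def _smallest_shift(shift, mod):
--     """Return the equivalent shift with the smallest absolute value. """
--     return (shift + (mod // 2)) % mod - mod // 2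
-- ===== SOURCE B (Python) =====
-- def _modular_median(values, mod):
--     """Return the modular median.
--
--     One residue counter is built once; each distinct residue's total shift is
--     computed from the counter, so duplicate values cost nothing extra.
--     """
--     if len(values) == 0:
--         raise ValueError
--
--     counts = {}
--     for value in values:
--         r = value % mod
--         counts[r] = counts.get(r, 0) + 1
--
--     half = mod // 2
--     seen = set()
--     best = None
--     best_cost = None
--     for pot_median in values:
--         rc = pot_median % mod
--         if rc in seen:
--             continue
--         seen.add(rc)
--         cost = 0
--         for r, cnt in counts.items():
--             cost += cnt * abs((r - rc + half) % mod - half)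
--         if best_cost is None or cost < best_cost:
--             best = pot_median
--             best_cost = cost
--     return best
-- ===== Notes on version B (the rewrite author's own statement) =====
-- stated objective: faster
-- what changed: B builds one residue counter (value % mod) and evaluates each distinct residue's total circular shift from the counter, skipping candidates whose residue was already scored, instead of A's per-candidate rescan of the whole list followed by min over a pair list; cost drops from O(n^2) to O(n*d) with d = distinct residues.
import Mathlib
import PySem

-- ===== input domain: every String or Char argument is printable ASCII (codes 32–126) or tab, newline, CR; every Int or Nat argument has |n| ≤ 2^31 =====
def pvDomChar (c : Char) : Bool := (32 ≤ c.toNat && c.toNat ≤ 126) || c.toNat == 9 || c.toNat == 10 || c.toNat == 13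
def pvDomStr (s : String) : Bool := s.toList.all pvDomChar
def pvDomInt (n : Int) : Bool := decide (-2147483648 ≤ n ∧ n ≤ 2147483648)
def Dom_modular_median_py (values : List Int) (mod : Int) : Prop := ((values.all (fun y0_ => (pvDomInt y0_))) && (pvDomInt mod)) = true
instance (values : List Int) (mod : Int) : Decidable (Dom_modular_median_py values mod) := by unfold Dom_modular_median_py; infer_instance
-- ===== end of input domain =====

-- B builds one residue counter and evaluates each distinct residue's total shift from it
-- (skipping duplicate residues), instead of A's full per-candidate rescan of the list.

-- ===== PORT A =====
-- _smallest_shift(shift, mod)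
def smallest_shift_py (shift mod : Int) : Int :=
  PySem.Int.mod (shift + PySem.Int.floordiv mod 2) mod - PySem.Int.floordiv mod 2

def modular_median_py (values : List Int) (mod : Int) : Int :=
  -- 'if len(values) == 0: raise ValueError' — excluded by Pre_; the port returns 0 there
  if values.length = 0 then 0
  else
    let pot_medians_shifts :=
      values.foldl (fun acc pot_median =>
        let tot_shift :=
          values.foldl (fun tot value => tot + |smallest_shift_py (value - pot_median) mod|) 0
        acc ++ [(pot_median, tot_shift)]) []
    match PySem.List.min? pot_medians_shifts (fun x => x.2) with
    | some p => p.1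
    | none => 0

-- ===== PORT B =====
def modular_median_py_alt (values : List Int) (mod : Int) : Int :=
  -- 'if len(values) == 0: raise ValueError' — excluded by Pre_; the port returns 0 there
  if values.length = 0 then 0
  else
    let counts := PySem.Dict.counter (values.map (fun value => PySem.Int.mod value mod))
    let half := PySem.Int.floordiv mod 2
    let res :=
      values.foldl (fun (st : PySem.Set Int × Option (Int × Int)) pot_median =>
        let rc := PySem.Int.mod pot_median mod
        if st.1.contains rc then st
        else
          let cost := counts.items.foldl
            (fun acc p => acc + p.2 * |PySem.Int.mod (p.1 - rc + half) mod - half|) 0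
          match st.2 with
          | none => (st.1.add rc, some (pot_median, cost))
          | some (b, bc) =>
              if cost < bc then (st.1.add rc, some (pot_median, cost))
              else (st.1.add rc, some (b, bc)))
        (PySem.Set.empty, none)
    match res.2 with
    | some p => p.1
    | none => 0

-- ===== PRECONDITION & SPEC =====
-- Pre_ excludes exactly the inputs on which the Python A raises: values = [] (ValueError)
-- and mod = 0 (ZeroDivisionError in _smallest_shift).
def Pre_modular_median_py (values : List Int) (mod : Int) : Prop :=
  values ≠ [] ∧ mod ≠ 0
instance (values : List Int) (mod : Int) : Decidable (Pre_modular_median_py values mod) := by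
  unfold Pre_modular_median_py; infer_instance

def pvWitness_modular_median_py : List Int × Int := ([3, 9, 1, 9], 10)

def Spec_modular_median_py (values : List Int) (mod : Int) (out : Int) : Prop :=
  out = modular_median_py_alt values mod
instance (values : List Int) (mod : Int) (out : Int) : Decidable (Spec_modular_median_py values mod out) := by
  unfold Spec_modular_median_py; infer_instance

-- ===== CLAIM (what is proved, stated in full; the proofs are below) =====
def Claim_equal_modular_median_py : Prop :=
  ∀ (values : List Int) (mod : Int), Dom_modular_median_py values mod →
    Pre_modular_median_py values mod →
    Spec_modular_median_py values mod (modular_median_py values mod)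

-- ===== LEMMAS AND PROOFS =====

-- the canonical first-minimum loop both ports reduce to
def runMin (f : Int → Int) (l : List Int) : Option (Int × Int) :=
  l.foldl (fun acc c =>
    match acc with
    | none => some (c, f c)
    | some m => if f c < m.2 then some (c, f c) else some m) none

def runMinP (f : Int → Int) (m : Int × Int) (l : List Int) : Int × Int :=
  l.foldl (fun m c => if f c < m.2 then (c, f c) else m) m

theorem runMinP_cons (f : Int → Int) (m : Int × Int) (a : Int) (t : List Int) :
    runMinP f m (a :: t) = runMinP f (if f a < m.2 then (a, f a) else m) t := rfl

theorem runMin_foldl_some (f : Int → Int) :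
    ∀ (l : List Int) (m : Int × Int),
      l.foldl (fun acc c =>
        match acc with
        | none => some (c, f c)
        | some m => if f c < m.2 then some (c, f c) else some m) (some m)
      = some (runMinP f m l) := by
  intro l
  induction l with
  | nil => intro m; simp [runMinP]
  | cons a t ih =>
      intro m
      rw [List.foldl_cons, runMinP_cons]
      by_cases h : f a < m.2 <;> simp only [if_pos, h] <;> exact ih _

theorem runMin_cons (f : Int → Int) (a : Int) (t : List Int) :
    runMin f (a :: t) = some (runMinP f (a, f a) t) := by
  simp only [runMin, List.foldl_cons]
  exact runMin_foldl_some f t (a, f a)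

theorem runMinP_le (f : Int → Int) :
    ∀ (l : List Int) (m : Int × Int),
      (runMinP f m l).2 ≤ m.2 ∧ ∀ c ∈ l, (runMinP f m l).2 ≤ f c := by
  intro l
  induction l with
  | nil => intro m; simp [runMinP]
  | cons a t ih =>
      intro m
      rw [runMinP_cons]
      by_cases h : f a < m.2
      · rw [if_pos h]
        refine ⟨le_of_lt (lt_of_le_of_lt (ih _).1 h), ?_⟩
        intro c hc
        rcases List.mem_cons.1 hc with rfl | hc
        · exact (ih _).1
        · exact (ih _).2 c hc
      · rw [if_neg h]
        refine ⟨(ih _).1, ?_⟩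
        intro c hc
        rcases List.mem_cons.1 hc with rfl | hc
        · exact le_trans (ih _).1 (le_of_not_gt h)
        · exact (ih _).2 c hc

theorem runMin_isMin (f : Int → Int) (l : List Int) (b : Int) (bc : Int)
    (h : runMin f l = some (b, bc)) : ∀ c ∈ l, bc ≤ f c := by
  cases l with
  | nil => simp [runMin] at h
  | cons a t =>
      rw [runMin_cons] at h
      intro c hc
      have hbc : bc = (runMinP f (a, f a) t).2 := by
        have := congrArg (fun o => (Option.getD o (0, 0)).2) h
        simpa using this.symm
      rcases List.mem_cons.1 hc with rfl | hc
      · exact hbc ▸ (runMinP_le f t (c, f c)).1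
      · exact hbc ▸ (runMinP_le f t (a, f a)).2 c hc

theorem runMin_ne_none (f : Int → Int) (a : Int) (t : List Int) :
    runMin f (a :: t) ≠ none := by
  rw [runMin_cons]; simp

theorem runMin_append (f : Int → Int) (l : List Int) (c : Int) :
    runMin f (l ++ [c]) =
      match runMin f l with
      | none => some (c, f c)
      | some m => if f c < m.2 then some (c, f c) else some m := by
  simp [runMin, List.foldl_append]

-- fmod is invariant under adding a multiple of the modulus
theorem fmod_add_mul (a k m : Int) (hm : m ≠ 0) : (a + k * m).fmod m = a.fmod m := by
  rw [Int.fmod_def, Int.fmod_def, Int.add_mul_fdiv_right a k hm]; ring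

theorem ofList_append_singleton (xs : List Int) (x : Int) :
    PySem.Set.ofList (xs ++ [x]) = PySem.Set.add (PySem.Set.ofList xs) x := by
  simp [PySem.Set.ofList, List.foldl_append]

theorem contains_ofList (xs : List Int) (x : Int) :
    (PySem.Set.ofList xs).contains x = true ↔ x ∈ xs := by
  rw [← PySem.Set.mem_ofList xs x]
  simp [PySem.Set.contains]

-- the weighted sum over distinct elements equals the plain sum
theorem sum_map_eq_counter_sum (l : List Int) (g : Int → Int) :
    ((PySem.Set.ofList l).map (fun k => (l.count k : Int) * g k)).sum = (l.map g).sum := by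
  have h1 : ((PySem.Set.ofList l).map (fun k => (l.count k : Int) * g k)).sum
      = (PySem.Set.ofList l : List Int).toFinset.sum (fun k => (l.count k : Int) * g k) :=
    (List.sum_toFinset _ (PySem.Set.nodup_ofList l)).symm
  have h2 : (PySem.Set.ofList l : List Int).toFinset = l.toFinset := by
    ext x
    simp [List.mem_toFinset, PySem.Set.mem_ofList]
  rw [h1, h2, Finset.sum_list_map_count l g]
  apply Finset.sum_congr rfl
  intro x _
  simp

-- A's per-candidate cost equals B's counter-computed cost at the candidate's residue
theorem cost_eq (values : List Int) (mod c : Int) (hm : mod ≠ 0) :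
    values.foldl (fun tot value => tot + |smallest_shift_py (value - c) mod|) 0
    = (PySem.Dict.counter (values.map (fun v => Int.fmod v mod))).items.foldl
        (fun acc p => acc + p.2 * |Int.fmod (p.1 - Int.fmod c mod + Int.fdiv mod 2) mod - Int.fdiv mod 2|) 0 := by
  rw [PySem.List.foldl_add, PySem.List.foldl_add, PySem.Dict.items_counter, List.map_map]
  congr 1
  show (values.map (fun v => |smallest_shift_py (v - c) mod|)).sum
     = ((PySem.Set.ofList (values.map (fun v => Int.fmod v mod))).map
         (fun k => (((values.map (fun v => Int.fmod v mod)).count k : Int))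
            * |Int.fmod (k - Int.fmod c mod + Int.fdiv mod 2) mod - Int.fdiv mod 2|)).sum
  rw [sum_map_eq_counter_sum, List.map_map]
  apply congrArg List.sum
  apply List.map_congr_left
  intro v _
  show |smallest_shift_py (v - c) mod|
      = |Int.fmod (Int.fmod v mod - Int.fmod c mod + Int.fdiv mod 2) mod - Int.fdiv mod 2|
  have harg : Int.fmod v mod - Int.fmod c mod + Int.fdiv mod 2
      = (v - c + Int.fdiv mod 2) + (Int.fdiv c mod - Int.fdiv v mod) * mod := by
    rw [Int.fmod_def, Int.fmod_def]; ring
  rw [harg, fmod_add_mul _ _ _ hm]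
  simp [smallest_shift_py, PySem.Int.mod, PySem.Int.floordiv]

-- B's fold, started after 'processed', extends runMin over the rest of the list
theorem loopB (mod : Int) (F : Int → Int) :
    ∀ (l processed : List Int),
      l.foldl (fun (st : PySem.Set Int × Option (Int × Int)) c =>
          if st.1.contains (Int.fmod c mod) then st
          else
            match st.2 with
            | none => (st.1.add (Int.fmod c mod), some (c, F (Int.fmod c mod)))
            | some (b, bc) =>
                if F (Int.fmod c mod) < bc then (st.1.add (Int.fmod c mod), some (c, F (Int.fmod c mod)))
                else (st.1.add (Int.fmod c mod), some (b, bc)))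
        (PySem.Set.ofList (processed.map (fun c => Int.fmod c mod)),
         runMin (fun c => F (Int.fmod c mod)) processed)
      = (PySem.Set.ofList ((processed ++ l).map (fun c => Int.fmod c mod)),
         runMin (fun c => F (Int.fmod c mod)) (processed ++ l)) := by
  intro l
  induction l with
  | nil => intro processed; simp
  | cons c t ih =>
      intro processed
      rw [List.foldl_cons]
      have hstep :
          (if (PySem.Set.ofList (processed.map (fun c => Int.fmod c mod))).contains (Int.fmod c mod) then
              (PySem.Set.ofList (processed.map (fun c => Int.fmod c mod)),
               runMin (fun c => F (Int.fmod c mod)) processed)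
            else
              match runMin (fun c => F (Int.fmod c mod)) processed with
              | none => ((PySem.Set.ofList (processed.map (fun c => Int.fmod c mod))).add (Int.fmod c mod),
                         some (c, F (Int.fmod c mod)))
              | some (b, bc) =>
                  if F (Int.fmod c mod) < bc then
                    ((PySem.Set.ofList (processed.map (fun c => Int.fmod c mod))).add (Int.fmod c mod),
                     some (c, F (Int.fmod c mod)))
                  else ((PySem.Set.ofList (processed.map (fun c => Int.fmod c mod))).add (Int.fmod c mod),
                        some (b, bc)))
          = (PySem.Set.ofList ((processed ++ [c]).map (fun c => Int.fmod c mod)),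
             runMin (fun c => F (Int.fmod c mod)) (processed ++ [c])) := by
        by_cases hc : (PySem.Set.ofList (processed.map (fun c => Int.fmod c mod))).contains (Int.fmod c mod)
        · rw [if_pos hc]
          have hmem : Int.fmod c mod ∈ processed.map (fun c => Int.fmod c mod) :=
            (contains_ofList _ _).1 hc
          rcases List.mem_map.1 hmem with ⟨c', hc', hrc⟩
          have hset : PySem.Set.ofList ((processed ++ [c]).map (fun c => Int.fmod c mod))
              = PySem.Set.ofList (processed.map (fun c => Int.fmod c mod)) := by
            rw [List.map_append, List.map_singleton, ofList_append_singleton]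
            simp only [PySem.Set.add]
            rw [if_pos hc]
          cases hproc : processed with
          | nil => simp [hproc] at hc'
          | cons a t' =>
              rcases hrm : runMin (fun c => F (Int.fmod c mod)) (a :: t') with _ | ⟨b, bc⟩
              · exact absurd hrm (runMin_ne_none _ a t')
              · have hle : bc ≤ F (Int.fmod c mod) := by
                  rw [← hrc]
                  exact runMin_isMin _ (a :: t') b bc hrm c' (hproc ▸ hc')
                rw [hproc] at hset
                rw [hset, runMin_append, hrm]
                have hnl : ¬ F (Int.fmod c mod) < bc := not_lt.2 hle
                simp [hnl]
        · rw [if_neg hc]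
          have hset : PySem.Set.ofList ((processed ++ [c]).map (fun c => Int.fmod c mod))
              = (PySem.Set.ofList (processed.map (fun c => Int.fmod c mod))).add (Int.fmod c mod) := by
            rw [List.map_append, List.map_singleton, ofList_append_singleton]
          rw [hset, runMin_append]
          rcases hrm : runMin (fun c => F (Int.fmod c mod)) processed with _ | ⟨b, bc⟩
          · rfl
          · by_cases hlt : F (Int.fmod c mod) < bc <;> simp [hlt]
      rw [hstep, ih (processed ++ [c]), List.append_assoc]
      rfl

-- A's port computes the first-minimum loop over its per-candidate costs
theorem A_char (values : List Int) (mod : Int) :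
    modular_median_py values mod =
      if values.length = 0 then 0 else
      match runMin (fun c => values.foldl
          (fun tot value => tot + |smallest_shift_py (value - c) mod|) 0) values with
      | some p => p.1
      | none => 0 := by
  unfold modular_median_py
  by_cases h : values.length = 0
  · rw [if_pos h, if_pos h]
  · rw [if_neg h, if_neg h]
    rw [PySem.List.foldl_append_singleton_eq_map
          (fun pot_median => (pot_median,
            values.foldl (fun tot value => tot + |smallest_shift_py (value - pot_median) mod|) 0))
          values []]
    have hmin : PySem.List.min?
        ([] ++ values.map (fun pot_median => (pot_median,
          values.foldl (fun tot value => tot + |smallest_shift_py (value - pot_median) mod|) 0)))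
        (fun x => x.2)
        = runMin (fun c => values.foldl
            (fun tot value => tot + |smallest_shift_py (value - c) mod|) 0) values := by
      simp only [List.nil_append, PySem.List.min?, runMin, List.foldl_map]
      apply List.foldl_ext
      intro acc y _
      cases acc <;> rfl
    exact congrArg (fun o : Option (Int × Int) => match o with | some p => p.1 | none => 0) hmin

-- B's port computes the same loop over the counter-evaluated costs
theorem B_char (values : List Int) (mod : Int) :
    modular_median_py_alt values mod =
      if values.length = 0 then 0 else
      match runMin (fun c => (PySem.Dict.counter (values.map (fun v => Int.fmod v mod))).items.foldl
          (fun acc p => acc + p.2 * |Int.fmod (p.1 - Int.fmod c mod + Int.fdiv mod 2) mod - Int.fdiv mod 2|) 0) values with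
      | some p => p.1
      | none => 0 := by
  unfold modular_median_py_alt
  by_cases h : values.length = 0
  · rw [if_pos h, if_pos h]
  · rw [if_neg h, if_neg h]
    exact congrArg (fun o : Option (Int × Int) => match o with | some p => p.1 | none => 0)
      (congrArg Prod.snd
        (loopB mod
          (fun rc => (PySem.Dict.counter (values.map (fun v => Int.fmod v mod))).items.foldl
            (fun acc p => acc + p.2 * |Int.fmod (p.1 - rc + Int.fdiv mod 2) mod - Int.fdiv mod 2|) 0)
          values []))

theorem modular_median_py_spec : Claim_equal_modular_median_py := by
  unfold Claim_equal_modular_median_py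
  intro values mod _ hpre
  rcases hpre with ⟨hne, hm⟩
  unfold Spec_modular_median_py
  rw [A_char, B_char values mod]
  rw [show (fun c => values.foldl (fun tot value => tot + |smallest_shift_py (value - c) mod|) 0)
      = (fun c => (PySem.Dict.counter (values.map (fun v => Int.fmod v mod))).items.foldl
          (fun acc p => acc + p.2 * |Int.fmod (p.1 - Int.fmod c mod + Int.fdiv mod 2) mod - Int.fdiv mod 2|) 0)
    from funext (fun c => cost_eq values mod c hm)]
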